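-- pv_equiv track=rewrite | github.com/aubford/peplink-agent | evals/analyze_kg.py | find_duplicate_id_nodes
-- ===== SOURCE A (Python) =====
-- import typing as t
--
-- def find_duplicate_id_nodes(kg_data: dict[str, t.Any]) -> list[dict[str, t.Any]]:
--     """Find nodes with duplicate IDs in the knowledge graph.
--
--     Args:
--         kg_data: Dictionary containing nodes and relationships data
--
--     Returns:
--         List of node objects that have duplicate IDs, including all instances
--     """
--     id_counts = {}
--     id_to_nodes = {}
--
--     # First pass: count IDs and collect nodes
--     for node in kg_data["nodes"]:
--         node_id = node["id"]
--         id_counts[node_id] = id_counts.get(node_id, 0) + 1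
--         id_to_nodes.setdefault(node_id, []).append(node)
--
--     # Collect all nodes that have duplicate IDs
--     duplicate_nodes = []
--     for node_id, count in id_counts.items():
--         if count > 1:
--             duplicate_nodes.extend(id_to_nodes[node_id])
--
--     # Sort duplicate nodes by ID
--     duplicate_nodes.sort(key=lambda x: x["id"])  # type: ignore
--     return duplicate_nodes
-- ===== SOURCE B (Python) =====
-- def find_duplicate_id_nodes(kg_data):
--     """Find nodes with duplicate IDs in the knowledge graph."""
--     nodes = kg_data["nodes"]
--     ids = [node["id"] for node in nodes]
--     duplicate_nodes = []
--     for nid in dict.fromkeys(ids):  # distinct ids, first-occurrence order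
--         if ids.count(nid) > 1:
--             duplicate_nodes.extend(n for n in nodes if n["id"] == nid)
--     return sorted(duplicate_nodes, key=lambda x: x["id"])
-- ===== Notes on version B (the rewrite author's own statement) =====
-- stated objective: simpler
-- what changed: B drops both dicts (the counter and the id->nodes grouping map): it dedups the id list once, and for each distinct id uses count/filter scans over the node list to emit the duplicate groups, then sorts with sorted() instead of in-place sort.
import Mathlib
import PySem

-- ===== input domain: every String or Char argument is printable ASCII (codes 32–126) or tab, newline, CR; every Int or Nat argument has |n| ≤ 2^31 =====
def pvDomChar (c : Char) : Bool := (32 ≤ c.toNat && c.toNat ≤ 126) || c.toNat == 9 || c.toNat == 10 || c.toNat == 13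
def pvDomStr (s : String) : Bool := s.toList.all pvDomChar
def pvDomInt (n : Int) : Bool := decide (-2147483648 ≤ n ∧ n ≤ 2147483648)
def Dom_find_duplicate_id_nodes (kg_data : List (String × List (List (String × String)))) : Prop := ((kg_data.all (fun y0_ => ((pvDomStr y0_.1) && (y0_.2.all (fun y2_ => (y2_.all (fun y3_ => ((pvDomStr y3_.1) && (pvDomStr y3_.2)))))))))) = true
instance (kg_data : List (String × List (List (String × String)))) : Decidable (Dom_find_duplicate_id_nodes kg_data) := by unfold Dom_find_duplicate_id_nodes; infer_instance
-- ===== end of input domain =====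

-- B removes both dicts of A: it dedups the id list and emits each duplicated id's group by a filter scan, then sorts (simpler decomposition, same cost class; return value only — neither version mutates its input).


-- shared helpers for the two ports: kg_data["nodes"] and node["id"] (the .getD defaults are
-- unreachable under Pre_, which demands both keys to be present)
def pvNodes (kg_data : List (String × List (List (String × String)))) : List (List (String × String)) :=
  ((PySem.Dict.mk kg_data).get? "nodes").getD []
def pvId (node : List (String × String)) : String :=
  ((PySem.Dict.mk node).get? "id").getD ""

-- ===== PORT A =====
def find_duplicate_id_nodes (kg_data : List (String × List (List (String × String)))) : List (List (String × String)) :=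
  let nodes := pvNodes kg_data
  -- first pass: id_counts[node_id] = id_counts.get(node_id, 0) + 1
  let id_counts : PySem.Dict String Int :=
    nodes.foldl (fun d n => d.insert (pvId n) (d.getD (pvId n) 0 + 1)) PySem.Dict.empty
  -- id_to_nodes.setdefault(node_id, []).append(node)
  let id_to_nodes : PySem.Dict String (List (List (String × String))) :=
    nodes.foldl (fun d n => d.modify (pvId n) [] (· ++ [n])) PySem.Dict.empty
  -- second loop over id_counts.items(); id_to_nodes[node_id] — the key is always present, so
  -- the KeyError branch is unreachable and getD is exact
  let duplicate_nodes :=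
    id_counts.items.foldl (fun acc p => if p.2 > 1 then acc ++ id_to_nodes.getD p.1 [] else acc) []
  PySem.List.sorted duplicate_nodes pvId

-- ===== PORT B =====
def find_duplicate_id_nodes_alt (kg_data : List (String × List (List (String × String)))) : List (List (String × String)) :=
  let nodes := pvNodes kg_data
  let ids := nodes.map pvId
  let duplicate_nodes :=
    (PySem.List.dedup ids).foldl
      (fun acc nid => if ids.count nid > 1 then acc ++ nodes.filter (fun n => pvId n == nid) else acc) []
  PySem.List.sorted duplicate_nodes pvId

-- ===== PRECONDITION & SPEC =====
-- Pre_ excludes exactly the inputs on which the Python raises KeyError: a kg_data without a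
-- "nodes" key, or a node without an "id" key.
def Pre_find_duplicate_id_nodes (kg_data : List (String × List (List (String × String)))) : Prop :=
  ((PySem.Dict.mk kg_data).get? "nodes").isSome = true ∧
  ∀ node ∈ pvNodes kg_data, ((PySem.Dict.mk node).get? "id").isSome = true
instance (kg_data : List (String × List (List (String × String)))) : Decidable (Pre_find_duplicate_id_nodes kg_data) := by unfold Pre_find_duplicate_id_nodes; infer_instance

def pvWitness_find_duplicate_id_nodes : (List (String × List (List (String × String)))) :=
  [("nodes", [[("id", "a")], [("id", "b")], [("id", "a")]])]

def Spec_find_duplicate_id_nodes (kg_data : List (String × List (List (String × String)))) (out : List (List (String × String))) : Prop := out = find_duplicate_id_nodes_alt kg_data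
instance (kg_data : List (String × List (List (String × String)))) (out : List (List (String × String))) : Decidable (Spec_find_duplicate_id_nodes kg_data out) := by unfold Spec_find_duplicate_id_nodes; infer_instance

-- ===== CLAIM (what is proved, stated in full; the proofs are below) =====
def Claim_equal_find_duplicate_id_nodes : Prop := ∀ (kg_data : List (String × List (List (String × String)))), Dom_find_duplicate_id_nodes kg_data → Pre_find_duplicate_id_nodes kg_data → Spec_find_duplicate_id_nodes kg_data (find_duplicate_id_nodes kg_data)

-- ===== LEMMAS AND PROOFS =====

-- A's counting loop is Counter(ids)
lemma counts_eq_counter (nodes : List (List (String × String))) :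
    nodes.foldl (fun d n => d.insert (pvId n) (d.getD (pvId n) 0 + 1)) (PySem.Dict.empty : PySem.Dict String Int)
      = PySem.Dict.counter (nodes.map pvId) := by
  rw [← PySem.Dict.foldl_insert_getD_add_one_eq_counter, List.foldl_map]

-- A's grouping dict looked up at c is B's filter scan
lemma groups_eq_filter (nodes : List (List (String × String))) (c : String) :
    (nodes.foldl (fun d n => d.modify (pvId n) [] (· ++ [n])) (PySem.Dict.empty : PySem.Dict String (List (List (String × String))))).getD c []
      = nodes.filter (fun n => pvId n == c) := by
  have h : nodes.foldl (fun d n => d.modify (pvId n) [] (· ++ [n])) (PySem.Dict.empty : PySem.Dict String (List (List (String × String))))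
      = (nodes.map (fun n => (pvId n, n))).foldl (fun d p => d.modify p.1 [] (· ++ [p.2])) PySem.Dict.empty := by
    simp only [List.foldl_map]
  rw [h, PySem.Dict.getD_foldl_modify_append]
  simp [List.filter_map, Function.comp_def]

-- ===== VERDICT (by name: the statement is the Claim_ definition above) =====
theorem find_duplicate_id_nodes_spec : Claim_equal_find_duplicate_id_nodes := by
  intro kg_data _ _
  show _ = _
  unfold find_duplicate_id_nodes find_duplicate_id_nodes_alt
  dsimp only
  congr 1
  rw [counts_eq_counter, PySem.Dict.items_counter, List.foldl_map, PySem.List.dedup_eq_ofList]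
  refine List.foldl_ext _ _ _ (fun acc k _ => ?_)
  rw [groups_eq_filter]
  by_cases h : 1 < ((pvNodes kg_data).map pvId).count k
  · rw [if_pos (show _ by simpa using h), if_pos (by simpa using h)]
  · rw [if_neg (show ¬ _ by simpa using h), if_neg (by simpa using h)]
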